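-- pv_equiv track=rewrite | github.com/Rfrodrigues37/dev-trilha-python | PROJETOS/folgas.py | gerar_sequencia_folga
-- ===== SOURCE A (Python) =====
-- def gerar_sequencia_folga(n):
--     sequencia_folga = []
--     valor_atual = 5
--
--     for i in range(n):
--         sequencia_folga.append(valor_atual)
--
--         if (i + 1) % 5 == 0:
--             valor_atual += 1
--         else:
--             valor_atual += 5
--
--     return sequencia_folga
-- ===== SOURCE B (Python) =====
-- def gerar_sequencia_folga(n):
--     # closed form: per 5-element block the value rises by 21; within a block by 5 per step
--     return [5 + 21 * (i // 5) + 5 * (i % 5) for i in range(n)]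
-- ===== Notes on version B (the rewrite author's own statement) =====
-- stated objective: alternative
-- what changed: Replaced the accumulator loop by a closed-form list comprehension: element i is 5 + 21*(i//5) + 5*(i%5).
import Mathlib
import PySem

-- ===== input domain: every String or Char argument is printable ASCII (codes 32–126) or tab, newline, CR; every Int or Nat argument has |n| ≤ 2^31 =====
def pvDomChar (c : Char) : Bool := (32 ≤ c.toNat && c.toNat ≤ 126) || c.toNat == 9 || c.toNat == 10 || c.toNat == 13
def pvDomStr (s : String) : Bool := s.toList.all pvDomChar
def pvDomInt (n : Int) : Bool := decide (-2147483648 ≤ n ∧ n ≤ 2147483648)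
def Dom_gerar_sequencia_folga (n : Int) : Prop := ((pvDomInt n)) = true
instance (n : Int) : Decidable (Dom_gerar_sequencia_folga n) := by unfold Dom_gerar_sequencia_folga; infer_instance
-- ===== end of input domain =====

-- B replaces A's running-accumulator loop by a closed-form per-index formula (alternative decomposition, same cost).

-- ===== PORT A =====
-- literal port of A: fold over range(n) carrying (sequencia_folga, valor_atual)
def gerar_sequencia_folga (n : Int) : List Int :=
  (PySem.List.pyRange 0 n 1).foldl
    (fun (st : List Int × Int) i =>
      let seq := st.1 ++ [st.2]
      let v := if PySem.Int.mod (i + 1) 5 = 0 then st.2 + 1 else st.2 + 5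
      (seq, v))
    ([], 5) |>.1

-- ===== PORT B =====
-- literal port of B: list comprehension with the closed form 5 + 21*(i//5) + 5*(i%5)
def gerar_sequencia_folga_alt (n : Int) : List Int :=
  (PySem.List.pyRange 0 n 1).map
    (fun i => 5 + 21 * PySem.Int.floordiv i 5 + 5 * PySem.Int.mod i 5)

-- ===== PRECONDITION & SPEC =====
def Spec_gerar_sequencia_folga (n : Int) (out : List Int) : Prop := out = gerar_sequencia_folga_alt n
instance (n : Int) (out : List Int) : Decidable (Spec_gerar_sequencia_folga n out) := by unfold Spec_gerar_sequencia_folga; infer_instance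

-- ===== CLAIM (what is proved, stated in full; the proofs are below) =====
def Claim_equal_gerar_sequencia_folga : Prop := ∀ (n : Int), Dom_gerar_sequencia_folga n → Spec_gerar_sequencia_folga n (gerar_sequencia_folga n)

-- ===== LEMMAS AND PROOFS =====

-- closed form of the element at index k (Nat form)
def pvClosed (k : Nat) : Int := 5 + 21 * ((k / 5 : Nat) : Int) + 5 * ((k % 5 : Nat) : Int)

-- the loop step, named for the invariant proof
def pvStep (st : List Int × Int) (i : Int) : List Int × Int :=
  (st.1 ++ [st.2], if PySem.Int.mod (i + 1) 5 = 0 then st.2 + 1 else st.2 + 5)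

-- invariant: after m iterations the state is (map pvClosed (range m), pvClosed m)
theorem pvLoop_inv (m : Nat) :
    ((List.range m).map Int.ofNat).foldl pvStep ([], 5)
      = ((List.range m).map pvClosed, pvClosed m) := by
  induction m with
  | zero => simp [pvClosed]
  | succ m ih =>
    rw [List.range_succ, List.map_append, List.foldl_append, ih]
    simp only [List.map_cons, List.map_nil, List.foldl_cons, List.foldl_nil, pvStep,
               List.map_append]
    refine Prod.ext rfl ?_
    have hm : PySem.Int.mod ((Int.ofNat m) + 1) 5 = (((m + 1) % 5 : Nat) : Int) := by
      exact_mod_cast PySem.Int.mod_natCast (m + 1) 5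
    rw [hm]
    simp only [pvClosed]
    by_cases h : (m + 1) % 5 = 0 <;> simp [h] <;> omega

-- both ports on a nonnegative argument equal the closed-form list
theorem pvA_eq (m : Nat) :
    gerar_sequencia_folga (m : Int) = (List.range m).map pvClosed := by
  unfold gerar_sequencia_folga
  rw [PySem.List.pyRange_one]
  have hmap : (List.range ((((m : Int)) - 0).toNat)).map (fun k : Nat => (0 : Int) + k)
      = (List.range m).map Int.ofNat := by
    simp
  rw [hmap]
  show (((List.range m).map Int.ofNat).foldl pvStep ([], 5)).1 = _
  rw [pvLoop_inv]

theorem pvB_eq (m : Nat) :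
    gerar_sequencia_folga_alt (m : Int) = (List.range m).map pvClosed := by
  unfold gerar_sequencia_folga_alt
  rw [PySem.List.pyRange_one]
  simp only [Int.sub_zero, Int.toNat_natCast, List.map_map]
  refine List.map_congr_left (fun k hk => ?_)
  simp only [Function.comp, Int.zero_add, pvClosed]
  rw [show PySem.Int.floordiv (k : Int) 5 = ((k / 5 : Nat) : Int) from
        by exact_mod_cast PySem.Int.floordiv_natCast k 5,
      show PySem.Int.mod (k : Int) 5 = ((k % 5 : Nat) : Int) from
        by exact_mod_cast PySem.Int.mod_natCast k 5]

-- ===== VERDICT (by name: the statement is the Claim_ definition above) =====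
theorem gerar_sequencia_folga_spec : Claim_equal_gerar_sequencia_folga := by
  intro n _
  unfold Spec_gerar_sequencia_folga
  by_cases hn : n ≤ 0
  · have h0 : PySem.List.pyRange 0 n 1 = [] := PySem.List.pyRange_one_eq_nil (by omega)
    simp [gerar_sequencia_folga, gerar_sequencia_folga_alt, h0]
  · have hcast : n = (n.toNat : Int) := by omega
    rw [hcast, pvA_eq, pvB_eq]
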